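-- pv_equiv track=rewrite | github.com/bookbot-kids/speechline | speechline/utils/aligner.py | generate_partitions
-- ===== SOURCE A (Python) =====
-- from itertools import combinations
-- from typing import Callable, Dict, List, Optional, Tuple, Union
--
-- def generate_partitions(lst: List, n: int) -> List[List[List]]:
--     """
--     Generate all possible `n` consecutive partitions.
--     Source: [StackOverflow](https://stackoverflow.com/a/73356868).
--
--     Args:
--         lst (List):
--             List to be partitioned.
--         n (int):
--             Number of partitions to generate.
--
--     Returns:
--         List[List[List]]:
--             List of all possible list of segments.
--     """
--     result = []
--     for indices in combinations(range(1, len(lst)), n - 1):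
--         splits = []
--         start = 0
--         for stop in indices:
--             splits.append(lst[start:stop])
--             start = stop
--         splits.append(lst[start:])
--         result.append(splits)
--     return result
-- ===== SOURCE B (Python) =====
-- from typing import List
--
--
-- def generate_partitions(lst: List, n: int) -> List[List[List]]:
--     """Recursive decomposition: pick the first segment's cut point, recurse on the rest."""
--     if n < 1:
--         return []
--     def go(rest, k):
--         if k == 1:
--             return [[rest]]
--         return [[rest[:i]] + tail
--                 for i in range(1, len(rest) - (k - 1) + 1)
--                 for tail in go(rest[i:], k - 1)]
--     return go(lst, n)
-- ===== Notes on version B (the rewrite author's own statement) =====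
-- stated objective: alternative
-- what changed: Replaces the combinations-of-cut-indices enumeration with a direct recursion that picks the first segment's length and recurses on the remaining suffix with one fewer part.
import Mathlib
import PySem

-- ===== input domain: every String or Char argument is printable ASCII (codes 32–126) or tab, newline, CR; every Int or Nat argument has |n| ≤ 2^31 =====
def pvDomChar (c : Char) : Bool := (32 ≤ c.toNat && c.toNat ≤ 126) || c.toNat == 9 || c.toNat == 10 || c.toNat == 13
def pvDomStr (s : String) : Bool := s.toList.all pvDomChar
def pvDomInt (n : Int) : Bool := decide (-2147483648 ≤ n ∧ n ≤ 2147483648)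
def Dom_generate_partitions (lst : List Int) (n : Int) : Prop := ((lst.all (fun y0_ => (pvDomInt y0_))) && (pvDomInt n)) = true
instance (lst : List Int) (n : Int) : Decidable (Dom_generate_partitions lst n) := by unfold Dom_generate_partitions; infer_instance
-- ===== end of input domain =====

-- B replaces A's combinations-of-cut-indices enumeration with a recursion on the
-- number of parts (first segment length, then recurse on the suffix): alternative algorithm, same cost.


-- ===== PORT A =====
-- itertools.combinations(xs, r) in lexicographic order
def pvCombos : List Int → Nat → List (List Int)
  | _, 0 => [[]]
  | [], _ + 1 => []
  | x :: xs, r + 1 => (pvCombos xs r).map (x :: ·) ++ pvCombos xs (r + 1)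

-- the inner loop of A: splits = []; start = 0; for stop in indices: …; splits.append(lst[start:])
def pvSplits (lst : List Int) (indices : List Int) : List (List Int) :=
  let st := indices.foldl
    (fun (p : List (List Int) × Int) stop =>
      (p.1 ++ [PySem.List.slice lst (some p.2) (some stop)], stop)) ([], 0)
  st.1 ++ [PySem.List.slice lst (some st.2) none]

-- (n-1).toNat: Python raises ValueError for n < 1; such n are outside Pre_generate_partitions
def generate_partitions (lst : List Int) (n : Int) : List (List (List Int)) :=
  (pvCombos (PySem.List.pyRange 1 (lst.length : Int) 1) (n - 1).toNat).foldl
    (fun result indices => result ++ [pvSplits lst indices]) []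

-- ===== PORT B =====
-- go(rest, k) of Source B, recursion on the part count k (0 is never reached from n ≥ 1)
def pvGo : Nat → List Int → List (List (List Int))
  | 0, _ => []
  | 1, rest => [[rest]]
  | k + 2, rest =>
    (PySem.List.pyRange 1 ((rest.length : Int) - (k + 1) + 1) 1).flatMap fun i =>
      (pvGo (k + 1) (PySem.List.slice rest (some i) none)).map
        (fun tail => PySem.List.slice rest none (some i) :: tail)

def generate_partitions_alt (lst : List Int) (n : Int) : List (List (List Int)) :=
  if n < 1 then [] else pvGo n.toNat lst

-- ===== PRECONDITION & SPEC =====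
-- Pre_ excludes n < 1, on which Python A raises ValueError (combinations with negative r).
def Pre_generate_partitions (lst : List Int) (n : Int) : Prop := 1 ≤ n
instance (lst : List Int) (n : Int) : Decidable (Pre_generate_partitions lst n) := by
  unfold Pre_generate_partitions; infer_instance
def pvWitness_generate_partitions : List Int × Int := ([1, 2, 3], 2)

def Spec_generate_partitions (lst : List Int) (n : Int) (out : List (List (List Int))) : Prop := out = generate_partitions_alt lst n
instance (lst : List Int) (n : Int) (out : List (List (List Int))) : Decidable (Spec_generate_partitions lst n out) := by unfold Spec_generate_partitions; infer_instance

-- ===== CLAIM (what is proved, stated in full; the proofs are below) =====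
def Claim_equal_generate_partitions : Prop := ∀ (lst : List Int) (n : Int), Dom_generate_partitions lst n → Pre_generate_partitions lst n → Spec_generate_partitions lst n (generate_partitions lst n)

-- ===== LEMMAS AND PROOFS =====

-- clean form of A's inner loop: cut lst at absolute indices, starting from offset s
def pvCuts (lst : List Int) : Int → List Int → List (List Int)
  | s, [] => [PySem.List.slice lst (some s) none]
  | s, j :: js => PySem.List.slice lst (some s) (some j) :: pvCuts lst j js

theorem pvFoldl_append_map {α β : Type} (f : α → β) :
    ∀ (l : List α) (acc : List β),
      l.foldl (fun r x => r ++ [f x]) acc = acc ++ l.map f := by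
  intro l
  induction l with
  | nil => intro acc; simp
  | cons x xs ih => intro acc; simp [List.foldl, ih]

theorem pvFlatMap_congr {α β : Type} {l : List α} {f g : α → List β}
    (h : ∀ x ∈ l, f x = g x) : l.flatMap f = l.flatMap g := by
  induction l with
  | nil => rfl
  | cons x xs ih =>
    simp only [List.flatMap_cons]
    rw [h x (by simp), ih (fun y hy => h y (by simp [hy]))]

theorem pvSplits_aux (lst : List Int) :
    ∀ (indices : List Int) (acc : List (List Int)) (s : Int),
      (let st := indices.foldl
          (fun (p : List (List Int) × Int) stop =>
            (p.1 ++ [PySem.List.slice lst (some p.2) (some stop)], stop)) (acc, s)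
       st.1 ++ [PySem.List.slice lst (some st.2) none]) = acc ++ pvCuts lst s indices := by
  intro indices
  induction indices with
  | nil => intro acc s; simp [pvCuts]
  | cons j js ih =>
    intro acc s
    simp only [List.foldl_cons]
    rw [ih (acc ++ [PySem.List.slice lst (some s) (some j)]) j]
    simp [pvCuts]

theorem pvSplits_eq_cuts (lst : List Int) (indices : List Int) :
    pvSplits lst indices = pvCuts lst 0 indices := by
  unfold pvSplits
  simpa using pvSplits_aux lst indices [] 0

theorem pvCombos_mem_subset : ∀ (xs : List Int) (k : Nat) (js : List Int),
    js ∈ pvCombos xs k → ∀ j ∈ js, j ∈ xs := by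
  intro xs
  induction xs with
  | nil =>
    intro k js h j hj
    cases k with
    | zero => simp [pvCombos] at h; subst h; simp at hj
    | succ k => simp [pvCombos] at h
  | cons x xs ih =>
    intro k js h j hj
    cases k with
    | zero => simp [pvCombos] at h; subst h; simp at hj
    | succ k =>
      simp only [pvCombos, List.mem_append, List.mem_map] at h
      rcases h with ⟨js', hjs', rfl⟩ | h
      · rcases List.mem_cons.mp hj with rfl | hj'
        · exact List.mem_cons_self
        · exact List.mem_cons_of_mem _ (ih k js' hjs' j hj')
      · exact List.mem_cons_of_mem _ (ih (k + 1) js h j hj)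

theorem pvCombos_map (f : Int → Int) : ∀ (xs : List Int) (k : Nat),
    pvCombos (xs.map f) k = (pvCombos xs k).map (List.map f) := by
  intro xs
  induction xs with
  | nil => intro k; cases k <;> simp [pvCombos]
  | cons x xs ih =>
    intro k
    cases k with
    | zero => simp [pvCombos]
    | succ k =>
      simp only [List.map_cons, pvCombos, ih, List.map_append, List.map_map]
      rfl

theorem pvCombos_nil_of_short : ∀ (xs : List Int) (k : Nat),
    xs.length < k → pvCombos xs k = [] := by
  intro xs
  induction xs with
  | nil =>
    intro k hk
    cases k with
    | zero => omega
    | succ k => rfl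
  | cons x xs ih =>
    intro k hk
    cases k with
    | zero => omega
    | succ k =>
      simp only [List.length_cons] at hk
      simp [pvCombos, ih k (by omega), ih (k + 1) (by omega)]

theorem pvCombos_range_split (k : Nat) : ∀ (m : Nat) (a b : Int), (b - a).toNat = m →
    pvCombos (PySem.List.pyRange a b 1) (k + 1)
      = (PySem.List.pyRange a b 1).flatMap
          (fun i => (pvCombos (PySem.List.pyRange (i + 1) b 1) k).map (i :: ·)) := by
  intro m
  induction m with
  | zero =>
    intro a b hm
    rw [PySem.List.pyRange_one_eq_nil (by omega)]
    rfl
  | succ m ih =>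
    intro a b hm
    rw [PySem.List.pyRange_one_cons (by omega)]
    simp only [pvCombos, List.flatMap_cons]
    rw [ih (a + 1) b (by omega)]

theorem pvRange_shift (a b i : Int) :
    PySem.List.pyRange (a + i) (b + i) 1 = (PySem.List.pyRange a b 1).map (· + i) := by
  rw [PySem.List.pyRange_one, PySem.List.pyRange_one, List.map_map]
  have h : b + i - (a + i) = b - a := by ring
  rw [h]
  apply List.map_congr_left
  intro k _
  simp [Function.comp]
  ring

theorem pvCuts_shift (lst : List Int) : ∀ (js : List Int) (s i : Int),
    0 ≤ s → 0 ≤ i → (∀ j ∈ js, 0 ≤ j) →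
    pvCuts lst (s + i) (js.map (· + i)) = pvCuts (lst.drop i.toNat) s js := by
  intro js
  induction js with
  | nil =>
    intro s i hs hi _
    simp only [List.map_nil, pvCuts]
    rw [PySem.List.slice_from _ (by omega), PySem.List.slice_from _ hs, List.drop_drop]
    have e : (s + i).toNat = i.toNat + s.toNat := by omega
    rw [e]
  | cons j js ih =>
    intro s i hs hi hmem
    have hj : 0 ≤ j := hmem j (by simp)
    simp only [List.map_cons, pvCuts]
    rw [PySem.List.slice_toNat _ (by omega) (by omega), PySem.List.slice_toNat _ hs hj,
      List.drop_drop, ih j i hj hi (fun y hy => hmem y (by simp [hy]))]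
    have e : (s + i).toNat = i.toNat + s.toNat := by omega
    have e2 : (j + i).toNat - (i.toNat + s.toNat) = j.toNat - s.toNat := by omega
    rw [e, e2]

theorem pvMain : ∀ (k : Nat) (lst : List Int),
    pvGo (k + 1) lst
      = (pvCombos (PySem.List.pyRange 1 (lst.length : Int) 1) k).map (pvCuts lst 0) := by
  intro k
  induction k with
  | zero =>
    intro lst
    simp only [pvGo, pvCombos, List.map_cons, List.map_nil, pvCuts]
    rw [PySem.List.slice_from _ (by omega)]
    simp
  | succ k ih =>
    intro lst
    have hL : (0 : Int) ≤ (lst.length : Int) := by positivity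
    set L : Int := (lst.length : Int) with hLdef
    by_cases hsmall : L - k ≤ 1
    · -- both sides empty
      have hlhs : pvGo (k + 1 + 1) lst = [] := by
        show (PySem.List.pyRange 1 (L - (k + 1) + 1) 1).flatMap _ = []
        rw [PySem.List.pyRange_one_eq_nil (by omega)]
        rfl
      rw [hlhs, pvCombos_nil_of_short _ (k + 1) (by rw [PySem.List.length_pyRange_one]; omega)]
      rfl
    · rw [not_le] at hsmall
      -- rewrite RHS
      rw [pvCombos_range_split k (L - 1).toNat 1 L (by omega),
        PySem.List.pyRange_one_append 1 (L - k) L (by omega) (by omega),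
        List.flatMap_append]
      have htail : (PySem.List.pyRange (L - k) L 1).flatMap
          (fun i => (pvCombos (PySem.List.pyRange (i + 1) L 1) k).map (i :: ·)) = [] := by
        rcases Nat.eq_zero_or_pos k with hk0 | hkpos
        · subst hk0
          rw [PySem.List.pyRange_one_eq_nil (by omega)]
          rfl
        · apply List.flatMap_eq_nil_iff.mpr
          intro i hi
          rw [PySem.List.mem_pyRange_one] at hi
          rw [pvCombos_nil_of_short _ k (by rw [PySem.List.length_pyRange_one]; omega)]
          rfl
      rw [htail, List.append_nil, List.map_flatMap]
      show (PySem.List.pyRange 1 (L - (k + 1) + 1) 1).flatMap _ = _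
      have hb : L - (k + 1) + 1 = L - k := by ring
      rw [hb]
      apply pvFlatMap_congr
      intro i hi
      rw [PySem.List.mem_pyRange_one] at hi
      obtain ⟨hi1, hi2⟩ := hi
      have hi0 : 0 ≤ i := by omega
      have hiL : i ≤ L := by omega
      -- LHS term
      rw [PySem.List.slice_from _ hi0, ih (lst.drop i.toNat)]
      have hlen : ((lst.drop i.toNat).length : Int) = L - i := by
        simp [List.length_drop]; omega
      rw [hlen]
      -- RHS term
      have hr : PySem.List.pyRange (i + 1) L 1 = (PySem.List.pyRange 1 (L - i) 1).map (· + i) := by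
        have : PySem.List.pyRange (i + 1) L 1 = PySem.List.pyRange (1 + i) (L - i + i) 1 := by
          congr 1 <;> ring
        rw [this, pvRange_shift]
      rw [hr, pvCombos_map]
      simp only [List.map_map]
      apply List.map_congr_left
      intro js hjs
      have hjs0 : ∀ j ∈ js, 0 ≤ j := by
        intro j hj
        have := pvCombos_mem_subset _ _ _ hjs j hj
        rw [PySem.List.mem_pyRange_one] at this
        omega
      simp only [Function.comp_apply]
      show PySem.List.slice lst none (some i) :: pvCuts (lst.drop i.toNat) 0 js
          = pvCuts lst 0 (i :: js.map (· + i))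
      simp only [pvCuts]
      rw [PySem.List.slice_to _ hi0]
      have hsh : pvCuts lst i (js.map (· + i)) = pvCuts (lst.drop i.toNat) 0 js := by
        have := pvCuts_shift lst js 0 i le_rfl hi0 hjs0
        rwa [zero_add] at this
      rw [hsh]
      congr 1
      rw [PySem.List.slice_zero_start, PySem.List.slice_to _ hi0]

-- ===== VERDICT (by name: the statement is the Claim_ definition above) =====
theorem generate_partitions_spec : Claim_equal_generate_partitions := by
  intro lst n _ hn
  unfold Pre_generate_partitions at hn
  unfold Spec_generate_partitions generate_partitions generate_partitions_alt
  rw [if_neg (by omega)]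
  have hk : n.toNat = (n - 1).toNat + 1 := by omega
  rw [hk, pvMain, pvFoldl_append_map, List.nil_append]
  apply List.map_congr_left
  intro js _
  exact pvSplits_eq_cuts lst js
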